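-- pv_equiv track=rewrite | github.com/BenSparksCode/advent-of-code-2023 | 2023/Python/13.py | get_col_scores
-- ===== SOURCE A (Python) =====
-- from typing import List
--
-- def get_col_scores(grid: List[str]) -> List[int]:
--     scores = []
--     for x in range(len(grid[0])):
--         curr_score = 0
--         for y in range(len(grid)):
--             if grid[y][x] == "#": curr_score += 2 * (10 ** y)
--             else: curr_score += 1 * (10 ** y)
--         scores.append(curr_score)
--     return scores
-- ===== SOURCE B (Python) =====
-- from typing import List
--
-- def get_col_scores(grid: List[str]) -> List[int]:
--     # Row-major single pass with Horner accumulation: keep one accumulator per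
--     # column and fold the rows from bottom to top (acc*10 + digit), instead of
--     # column-major loops with 10**y power weights.
--     cols = [0] * len(grid[0])
--     for row in reversed(grid):
--         cols = [c * 10 + (2 if ch == "#" else 1) for c, ch in zip(cols, row)]
--     return cols
-- ===== Notes on version B (the rewrite author's own statement) =====
-- stated objective: faster
-- what changed: Replaces the column-major double loop with 10**y power weights by a single row-major pass over reversed(grid) keeping one Horner accumulator per column (acc*10 + digit), so no big-integer power is ever computed.
import Mathlib
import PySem

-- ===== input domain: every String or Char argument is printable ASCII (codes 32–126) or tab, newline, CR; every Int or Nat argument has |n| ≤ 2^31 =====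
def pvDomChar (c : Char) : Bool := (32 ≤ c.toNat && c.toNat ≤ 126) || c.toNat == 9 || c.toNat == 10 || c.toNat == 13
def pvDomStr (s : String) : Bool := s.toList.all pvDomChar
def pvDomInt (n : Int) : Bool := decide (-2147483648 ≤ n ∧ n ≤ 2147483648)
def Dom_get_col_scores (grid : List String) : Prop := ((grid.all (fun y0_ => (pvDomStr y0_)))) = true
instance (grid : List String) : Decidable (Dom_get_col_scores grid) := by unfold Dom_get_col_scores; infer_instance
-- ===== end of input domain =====

-- B replaces A's column-major double loop with 10**y power weights by a single
-- row-major pass over the reversed grid keeping one Horner accumulator per column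
-- (measured faster: no big-integer 10**y power is recomputed per cell).

-- ===== PORT A =====
def get_col_scores (grid : List String) : List Int :=
  (PySem.List.pyRange 0 (PySem.Str.len (PySem.List.pyGetD grid 0 ""))).foldl
    (fun scores x =>
      scores ++ [(PySem.List.pyRange 0 ((grid.length : Int))).foldl
        (fun curr_score y =>
          if PySem.List.pyGetD (PySem.List.pyGetD grid y "").toList x ' ' = '#'
          then curr_score + 2 * 10 ^ y.toNat
          else curr_score + 1 * 10 ^ y.toNat) 0]) []

-- ===== PORT B =====
def get_col_scores_alt (grid : List String) : List Int :=
  grid.reverse.foldl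
    (fun cols row =>
      (cols.zip row.toList).map (fun p => p.1 * 10 + (if p.2 = '#' then 2 else 1)))
    (List.replicate (PySem.Str.len (PySem.List.pyGetD grid 0 "")).toNat 0)

-- ===== PRECONDITION & SPEC =====
-- Pre_ excludes exactly the inputs where A raises IndexError: the empty grid
-- (grid[0]) and grids with a row shorter than the first row (grid[y][x]).
def Pre_get_col_scores (grid : List String) : Prop :=
  grid ≠ [] ∧ ∀ s ∈ grid, (grid.headD "").toList.length ≤ s.toList.length
instance (grid : List String) : Decidable (Pre_get_col_scores grid) := by
  unfold Pre_get_col_scores; infer_instance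

def pvWitness_get_col_scores : List String := ["#.", ".#", "##"]

def Spec_get_col_scores (grid : List String) (out : List Int) : Prop := out = get_col_scores_alt grid
instance (grid : List String) (out : List Int) : Decidable (Spec_get_col_scores grid out) := by unfold Spec_get_col_scores; infer_instance

-- ===== CLAIM (what is proved, stated in full; the proofs are below) =====
def Claim_equal_get_col_scores : Prop := ∀ (grid : List String), Dom_get_col_scores grid → Pre_get_col_scores grid → Spec_get_col_scores grid (get_col_scores grid)

-- ===== LEMMAS AND PROOFS =====

-- the digit a cell contributes
def pvDig (ch : Char) : Int := if ch = '#' then 2 else 1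

-- Horner evaluation over the reversed digit list = power-weighted sum (A's weighting)
lemma pv_horner (ds : List Int) (acc : Int) :
    ds.reverse.foldl (fun a t => a * 10 + t) acc
      = acc * 10 ^ ds.length + ((List.range ds.length).map (fun y => ds.getD y 0 * 10 ^ y)).sum := by
  induction ds generalizing acc with
  | nil => simp
  | cons d ds ih =>
      simp only [List.reverse_cons, List.foldl_append, List.foldl_cons, List.foldl_nil, ih,
        List.length_cons, List.range_succ_eq_map, List.map_cons, List.map_map, List.sum_cons,
        List.getD_cons_zero, Function.comp_def, Nat.succ_eq_add_one, List.getD_cons_succ]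
      have : ((List.range ds.length).map (fun y => ds.getD y 0 * 10 ^ (y + 1))).sum
          = ((List.range ds.length).map (fun y => ds.getD y 0 * 10 ^ y)).sum * 10 := by
        rw [← List.sum_map_mul_right]
        congr 1
        apply List.map_congr_left; intro y _; ring
      rw [this]; ring

-- B's fold characterized per column
lemma pv_B_fold (rs : List (List Char)) (v : List Int)
    (h : ∀ r ∈ rs, v.length ≤ r.length) :
    rs.foldl (fun cols row =>
        (cols.zip row).map (fun p => p.1 * 10 + (if p.2 = '#' then 2 else 1))) v
      = (List.range v.length).map
          (fun x => rs.foldl (fun a r => a * 10 + pvDig (r.getD x ' ')) (v.getD x 0)) := by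
  induction rs generalizing v with
  | nil =>
      apply List.ext_getElem
      · simp
      · intro i h1 h2
        simp only [List.foldl_nil, List.getElem_map, List.getElem_range]
        rw [List.getD_eq_getElem _ _ (by simpa using h2)]
  | cons r rs ih =>
      have hr : v.length ≤ r.length := h r (by simp)
      have hlen : ((v.zip r).map (fun p => p.1 * 10 + (if p.2 = '#' then 2 else 1))).length = v.length := by
        simp [Nat.min_eq_left hr]
      simp only [List.foldl_cons]
      rw [ih _ (by intro r' hr'; rw [hlen]; exact h r' (by simp [hr']))]
      rw [hlen]
      apply List.map_congr_left
      intro x hx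
      have hxv : x < v.length := List.mem_range.mp hx
      have hxr : x < r.length := lt_of_lt_of_le hxv hr
      congr 1
      rw [List.getD_eq_getElem _ _ (by rw [hlen]; exact hxv),
          List.getD_eq_getElem _ _ hxv, List.getD_eq_getElem _ _ hxr]
      simp [pvDig]

-- A's inner loop is the power-weighted sum of the column digits
lemma pv_A_col (grid : List String) (x : Int) :
    (PySem.List.pyRange 0 ((grid.length : Int))).foldl
        (fun curr_score y =>
          if PySem.List.pyGetD (PySem.List.pyGetD grid y "").toList x ' ' = '#'
          then curr_score + 2 * 10 ^ y.toNat
          else curr_score + 1 * 10 ^ y.toNat) 0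
      = ((List.range grid.length).map
          (fun y => pvDig (PySem.List.pyGetD (grid.getD y "").toList x ' ') * 10 ^ y)).sum := by
  rw [PySem.List.pyRange_zero_natCast, List.foldl_map]
  have hfun : (fun (a : Int) (k : Nat) =>
      if PySem.List.pyGetD (PySem.List.pyGetD grid (k : Int) "").toList x ' ' = '#'
      then a + 2 * 10 ^ ((k : Int)).toNat
      else a + 1 * 10 ^ ((k : Int)).toNat)
      = fun a k => a + pvDig (PySem.List.pyGetD (grid.getD k "").toList x ' ') * 10 ^ k := by
    funext a k
    simp only [PySem.List.pyGetD_natCast, Int.toNat_natCast, pvDig]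
    split_ifs <;> ring
  rw [hfun, PySem.List.foldl_add]
  simp

-- ===== VERDICT (by name: the statement is the Claim_ definition above) =====
theorem get_col_scores_spec : Claim_equal_get_col_scores := by
  intro grid _ hpre
  obtain ⟨hne, hrows⟩ := hpre
  obtain ⟨g0, gs, rfl⟩ : ∃ g0 gs, grid = g0 :: gs := by
    cases grid with
    | nil => exact absurd rfl hne
    | cons a l => exact ⟨a, l, rfl⟩
  unfold Spec_get_col_scores get_col_scores get_col_scores_alt
  set grid := g0 :: gs with hgrid
  have hw0 : PySem.List.pyGetD grid 0 "" = g0 := PySem.List.pyGetD_zero_cons _ _ _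
  rw [hw0, PySem.Str.len_eq]
  set w := g0.toList.length with hw
  -- A side
  rw [PySem.List.foldl_append_singleton_eq_map, List.nil_append,
      PySem.List.pyRange_zero_natCast w, List.map_map]
  have hA : ∀ k, ((fun x => (PySem.List.pyRange 0 ((grid.length : Int))).foldl
        (fun curr_score y =>
          if PySem.List.pyGetD (PySem.List.pyGetD grid y "").toList x ' ' = '#'
          then curr_score + 2 * 10 ^ y.toNat
          else curr_score + 1 * 10 ^ y.toNat) 0) ∘ (fun (k : Nat) => (k : Int))) k
      = ((List.range grid.length).map
          (fun y => pvDig (PySem.List.pyGetD (grid.getD y "").toList (k : Int) ' ') * 10 ^ y)).sum := by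
    intro k; exact pv_A_col grid (k : Int)
  rw [List.map_congr_left (fun k _ => hA k)]
  -- B side
  have hBmap : grid.reverse.foldl
      (fun cols row => (cols.zip row.toList).map (fun p => p.1 * 10 + (if p.2 = '#' then 2 else 1)))
      (List.replicate ((w : Int)).toNat (0 : Int))
      = (grid.reverse.map String.toList).foldl
      (fun cols r => (cols.zip r).map (fun p => p.1 * 10 + (if p.2 = '#' then 2 else 1)))
      (List.replicate ((w : Int)).toNat (0 : Int)) := by
    rw [List.foldl_map]
  rw [hBmap]
  rw [pv_B_fold _ _ (by
    intro r hr
    simp only [List.mem_map, List.mem_reverse] at hr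
    obtain ⟨s, hs, rfl⟩ := hr
    simpa using hrows s hs)]
  simp only [List.length_replicate, Int.toNat_natCast]
  apply List.map_congr_left
  intro x hx
  -- B column value via foldl_map and Horner
  have hv0 : (List.replicate w (0 : Int)).getD x 0 = 0 := by
    rcases Nat.lt_or_ge x w with h | h
    · simp [List.getD, h]
    · simp [List.getD, Nat.not_lt.mpr h]
  rw [hv0]
  have hBcol : (grid.reverse.map String.toList).foldl
      (fun a r => a * 10 + pvDig (r.getD x ' ')) 0
      = ((grid.map (fun s => pvDig (s.toList.getD x ' '))).reverse).foldl
        (fun a t => a * 10 + t) 0 := by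
    rw [← List.map_reverse, List.foldl_map, List.foldl_map]
  rw [hBcol, pv_horner]
  simp only [List.length_map, zero_mul, zero_add]
  congr 1
  apply List.map_congr_left
  intro y hy
  have hy' : y < grid.length := List.mem_range.mp hy
  have hy'' : y < (grid.map (fun s => pvDig (s.toList.getD x ' '))).length := by simpa using hy'
  rw [List.getD_eq_getElem _ 0 hy'', List.getElem_map, List.getD_eq_getElem _ "" hy']
  simp [PySem.List.pyGetD_natCast]
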